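-- pv_equiv track=rewrite | github.com/Piyapansys/JhonnyV | app/adldap.py | parse_dn
-- ===== SOURCE A (Python) =====
-- def parse_dn(dn):
--     dn_parts = dn.split(',')
--     dn_dict = {}
--     key_list = ['CN', 'OU1', 'OU2', 'OU3', 'DC1', 'DC2']
--     ou_count = 0
--     dc_count = 0
--
--     for part in dn_parts:
--         if '=' in part:
--             key, value = part.split('=', 1)
--             key = key.strip().upper()
--             value = value.strip()
--
--             if key == 'CN':
--                 dn_dict['CN'] = value
--             elif key == 'OU':
--                 ou_count += 1
--                 if ou_count <= 3:
--                     dn_dict[f'OU{ou_count}'] = value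
--             elif key == 'DC':
--                 dc_count += 1
--                 if dc_count <= 2:
--                     dn_dict[f'DC{dc_count}'] = value
--
--     # Ensure all keys are present, even if empty
--     for key in key_list:
--         if key not in dn_dict:
--             dn_dict[key] = ''
--
--     return dn_dict
-- ===== SOURCE B (Python) =====
-- def parse_dn(dn):
--     # Two-phase: extract all (key, value) pairs, label each with its slot name
--     # (OUs and DCs numbered by how many of the same kind precede them), then
--     # build the dict from the labeled pairs and fill in the missing slots.
--     pairs = []
--     for part in dn.split(','):
--         if '=' in part:
--             k, v = part.split('=', 1)
--             pairs.append((k.strip().upper(), v.strip()))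
--     slotted = []
--     for i, (k, v) in enumerate(pairs):
--         if k == 'CN':
--             slotted.append(('CN', v))
--         elif k in ('OU', 'DC'):
--             n = 1 + sum(1 for q, _ in pairs[:i] if q == k)
--             if n <= (3 if k == 'OU' else 2):
--                 slotted.append((k + str(n), v))
--     result = dict(slotted)
--     for key in ('CN', 'OU1', 'OU2', 'OU3', 'DC1', 'DC2'):
--         result.setdefault(key, '')
--     return result
-- ===== Notes on version B (the rewrite author's own statement) =====
-- stated objective: alternative
-- what changed: Replaces A's single stateful loop with running OU/DC counters and in-loop dict writes by a label-then-build pipeline: extract all (key,value) pairs, compute each pair's slot name from how many pairs of the same kind precede it (dropping OUs past the third and DCs past the second), build the result with dict() over the labeled pairs, and fill the missing expected slots with setdefault.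
import Mathlib
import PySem

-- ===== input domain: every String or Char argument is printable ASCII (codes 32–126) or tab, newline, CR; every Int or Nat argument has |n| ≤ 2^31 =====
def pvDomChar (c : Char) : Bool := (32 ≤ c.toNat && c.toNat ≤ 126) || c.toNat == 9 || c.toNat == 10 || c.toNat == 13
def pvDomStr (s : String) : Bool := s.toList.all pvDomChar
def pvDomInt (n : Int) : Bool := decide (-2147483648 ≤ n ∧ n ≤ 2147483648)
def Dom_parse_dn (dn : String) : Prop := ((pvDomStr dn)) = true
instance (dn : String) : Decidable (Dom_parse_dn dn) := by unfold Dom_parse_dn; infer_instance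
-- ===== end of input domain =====

-- B labels each extracted pair with its slot name (numbering OU/DC by preceding pairs of the
-- same kind) and builds the dict from the labeled list, instead of A's in-loop counter writes;
-- objective: alternative (same result, different decomposition).

-- ===== PORT A =====
-- loop body of A's 'for part in dn_parts' (dict, ou_count, dc_count as state)
def pvA_step (s : PySem.Dict String String × Int × Int) (part : String) :
    PySem.Dict String String × Int × Int :=
  if PySem.Str.isIn "=" part then
    match PySem.Str.splitMax? part "=" 1 with
    | some [k0, v0] =>
        let key := PySem.Str.upper (PySem.Str.strip k0)
        let value := PySem.Str.strip v0
        if key = "CN" then (s.1.insert "CN" value, s.2.1, s.2.2)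
        else if key = "OU" then
          ((if s.2.1 + 1 ≤ 3 then s.1.insert ("OU" ++ PySem.Int.toStr (s.2.1 + 1)) value else s.1),
            s.2.1 + 1, s.2.2)
        else if key = "DC" then
          ((if s.2.2 + 1 ≤ 2 then s.1.insert ("DC" ++ PySem.Int.toStr (s.2.2 + 1)) value else s.1),
            s.2.1, s.2.2 + 1)
        else s
    | _ => s   -- unreachable: '=' in part gives exactly two pieces
  else s

def parse_dn (dn : String) : List (String × String) :=
  let dn_parts := (PySem.Str.split? dn ",").getD []    -- sep "," ≠ "" so split? is some
  let st := dn_parts.foldl pvA_step (PySem.Dict.empty, 0, 0)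
  let final := ["CN", "OU1", "OU2", "OU3", "DC1", "DC2"].foldl
      (fun d key => if d.contains key then d else d.insert key "") st.1
  final.items

-- ===== PORT B =====
-- loop body of Source B's collect pass ('pairs.append(…)')
def pvB_collect (acc : List (String × String)) (part : String) : List (String × String) :=
  if PySem.Str.isIn "=" part then
    match PySem.Str.splitMax? part "=" 1 with
    | some [k0, v0] => acc ++ [(PySem.Str.upper (PySem.Str.strip k0), PySem.Str.strip v0)]
    | _ => acc   -- unreachable: '=' in part gives exactly two pieces
  else acc

-- loop body of Source B's labeling pass ('for i, (k, v) in enumerate(pairs)'); the 0/1-sum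
-- 'sum(1 for q, _ in pairs[:i] if q == k)' is List.countP over the slice
def pvB_label (pairs : List (String × String)) (acc : List (String × String))
    (q : Int × (String × String)) : List (String × String) :=
  if q.2.1 = "CN" then acc ++ [("CN", q.2.2)]
  else if q.2.1 = "OU" ∨ q.2.1 = "DC" then
    if 1 + ((PySem.List.slice pairs none (some q.1)).countP (fun p => p.1 == q.2.1) : Int)
        ≤ (if q.2.1 = "OU" then 3 else 2) then
      acc ++ [(q.2.1 ++ PySem.Int.toStr
        (1 + ((PySem.List.slice pairs none (some q.1)).countP (fun p => p.1 == q.2.1) : Int)), q.2.2)]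
    else acc
  else acc

def parse_dn_alt (dn : String) : List (String × String) :=
  let pairs := ((PySem.Str.split? dn ",").getD []).foldl pvB_collect []
  let slotted := (PySem.List.enumerate pairs).foldl (pvB_label pairs) []
  let result := slotted.foldl (fun d kv => d.insert kv.1 kv.2) PySem.Dict.empty   -- dict(slotted)
  let final := ["CN", "OU1", "OU2", "OU3", "DC1", "DC2"].foldl
      (fun d key => d.setdefault key "") result
  final.items

-- ===== PRECONDITION & SPEC =====
def Spec_parse_dn (dn : String) (out : List (String × String)) : Prop := out = parse_dn_alt dn
instance (dn : String) (out : List (String × String)) : Decidable (Spec_parse_dn dn out) := by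
  unfold Spec_parse_dn; infer_instance

-- ===== CLAIM (what is proved, stated in full; the proofs are below) =====
def Claim_equal_parse_dn : Prop := ∀ (dn : String), Dom_parse_dn dn → Spec_parse_dn dn (parse_dn dn)

-- ===== LEMMAS AND PROOFS =====

-- the (key, value) pair a DN part contributes, if any
def pvPairOf (part : String) : Option (String × String) :=
  if PySem.Str.isIn "=" part then
    match PySem.Str.splitMax? part "=" 1 with
    | some [k0, v0] => some (PySem.Str.upper (PySem.Str.strip k0), PySem.Str.strip v0)
    | _ => none
  else none

def pvPairsL (parts : List String) : List (String × String) := parts.filterMap pvPairOf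

-- A's loop body at the pair level
def pvStepP (s : PySem.Dict String String × Int × Int) (kv : String × String) :
    PySem.Dict String String × Int × Int :=
  if kv.1 = "CN" then (s.1.insert "CN" kv.2, s.2.1, s.2.2)
  else if kv.1 = "OU" then
    ((if s.2.1 + 1 ≤ 3 then s.1.insert ("OU" ++ PySem.Int.toStr (s.2.1 + 1)) kv.2 else s.1),
      s.2.1 + 1, s.2.2)
  else if kv.1 = "DC" then
    ((if s.2.2 + 1 ≤ 2 then s.1.insert ("DC" ++ PySem.Int.toStr (s.2.2 + 1)) kv.2 else s.1),
      s.2.1, s.2.2 + 1)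
  else s

-- the slot labels one appended pair contributes, given the pairs before it
def pvLab (P : List (String × String)) (kv : String × String) : List (String × String) :=
  if kv.1 = "CN" then [("CN", kv.2)]
  else if kv.1 = "OU" ∨ kv.1 = "DC" then
    if 1 + (P.countP (fun p => p.1 == kv.1) : Int) ≤ (if kv.1 = "OU" then 3 else 2) then
      [(kv.1 ++ PySem.Int.toStr (1 + (P.countP (fun p => p.1 == kv.1) : Int)), kv.2)]
    else []
  else []

def pvSlotted (P : List (String × String)) : List (String × String) :=
  (PySem.List.enumerate P).foldl (pvB_label P) []

-- ---- parts-level to pair-level reductions ----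

theorem pvA_step_eq (s : PySem.Dict String String × Int × Int) (part : String) :
    pvA_step s part = match pvPairOf part with
      | none => s
      | some kv => pvStepP s kv := by
  unfold pvA_step pvPairOf
  by_cases h : PySem.Str.isIn "=" part
  · rw [if_pos h, if_pos h]
    cases hs : PySem.Str.splitMax? part "=" 1 with
    | none => rfl
    | some l =>
      match l with
      | [] => rfl
      | [a] => rfl
      | [a, b] => simp [pvStepP]
      | a :: b :: c :: t => rfl
  · rw [if_neg h, if_neg h]

theorem pvA_fold (parts : List String) (s : PySem.Dict String String × Int × Int) :
    parts.foldl pvA_step s = (pvPairsL parts).foldl pvStepP s := by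
  induction parts generalizing s with
  | nil => rfl
  | cons p t ih =>
    simp only [List.foldl_cons, pvPairsL, List.filterMap_cons]
    rw [pvA_step_eq]
    cases hp : pvPairOf p <;> simp [pvPairsL] at ih ⊢ <;> rw [ih]

theorem pvB_collect_eq (acc : List (String × String)) (part : String) :
    pvB_collect acc part = acc ++ (pvPairOf part).toList := by
  unfold pvB_collect pvPairOf
  by_cases h : PySem.Str.isIn "=" part
  · rw [if_pos h, if_pos h]
    cases hs : PySem.Str.splitMax? part "=" 1 with
    | none => simp
    | some l =>
      match l with
      | [] => simp
      | [a] => simp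
      | [a, b] => simp
      | a :: b :: c :: t => simp
  · rw [if_neg h, if_neg h]; simp

theorem pvB_fold (parts : List String) (acc : List (String × String)) :
    parts.foldl pvB_collect acc = acc ++ pvPairsL parts := by
  induction parts generalizing acc with
  | nil => simp [pvPairsL]
  | cons p t ih =>
    simp only [List.foldl_cons, pvPairsL, List.filterMap_cons]
    rw [pvB_collect_eq, ih]
    cases hp : pvPairOf p <;> simp [pvPairsL]

-- ---- the labeling pass, one appended pair at a time ----

theorem pvB_label_take {P Q : List (String × String)}
    (acc : List (String × String)) (q : Int × (String × String))
    (h : PySem.List.slice P none (some q.1) = PySem.List.slice Q none (some q.1)) :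
    pvB_label P acc q = pvB_label Q acc q := by
  unfold pvB_label
  rw [h]

theorem pvSlotted_snoc (P : List (String × String)) (kv : String × String) :
    pvSlotted (P ++ [kv]) = pvSlotted P ++ pvLab P kv := by
  unfold pvSlotted
  rw [PySem.List.enumerate_append]
  rw [List.foldl_append]
  have h1 : (PySem.List.enumerate P).foldl (pvB_label (P ++ [kv])) []
      = (PySem.List.enumerate P).foldl (pvB_label P) [] := by
    apply PySem.List.foldl_congr_mem
    intro acc q hq
    apply pvB_label_take
    obtain ⟨k, hk, rfl⟩ := (PySem.List.mem_enumerate_iff _ _ _).mp hq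
    simp only [zero_add]
    rw [PySem.List.slice_to _ (by positivity), PySem.List.slice_to _ (by positivity)]
    rw [List.take_append_of_le_length (by simpa using le_of_lt hk)]
  rw [h1]
  have h2 : ∀ acc, pvB_label (P ++ [kv]) acc ((0 + (P.length : Int)), kv)
      = acc ++ pvLab P kv := by
    intro acc
    unfold pvB_label pvLab
    have hsl : PySem.List.slice (P ++ [kv]) none (some ((0 : Int) + (P.length : Int))) = P := by
      rw [PySem.List.slice_to _ (by positivity)]
      simp
    rw [hsl]
    by_cases h1 : kv.1 = "CN"
    · rw [if_pos h1, if_pos h1]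
    · rw [if_neg h1, if_neg h1]
      by_cases h2 : kv.1 = "OU" ∨ kv.1 = "DC"
      · rw [if_pos h2, if_pos h2]
        split_ifs <;> simp
      · rw [if_neg h2, if_neg h2]; simp
  simp only [PySem.List.enumerate_cons, PySem.List.enumerate_nil, List.foldl_cons, List.foldl_nil]
  exact h2 _

-- ---- countP facts for the appended pair ----

theorem pvCount_snoc_self (P : List (String × String)) (kv : String × String) (c : String)
    (h : kv.1 = c) :
    ((P ++ [kv]).countP (fun p => p.1 == c) : Int) = (P.countP (fun p => p.1 == c) : Int) + 1 := by
  rw [List.countP_append]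
  simp [h]

theorem pvCount_snoc_other (P : List (String × String)) (kv : String × String) (c : String)
    (h : kv.1 ≠ c) :
    ((P ++ [kv]).countP (fun p => p.1 == c) : Int) = (P.countP (fun p => p.1 == c) : Int) := by
  rw [List.countP_append]
  simp [h]

-- ---- A's loop body on one pair, expressed through pvLab ----

theorem pvStepP_snoc (D : PySem.Dict String String) (P : List (String × String))
    (kv : String × String) :
    pvStepP (D, (P.countP (fun p => p.1 == "OU") : Int),
               (P.countP (fun p => p.1 == "DC") : Int)) kv
      = ((pvLab P kv).foldl (fun d kv => d.insert kv.1 kv.2) D,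
         ((P ++ [kv]).countP (fun p => p.1 == "OU") : Int),
         ((P ++ [kv]).countP (fun p => p.1 == "DC") : Int)) := by
  unfold pvStepP pvLab
  by_cases h1 : kv.1 = "CN"
  · rw [pvCount_snoc_other P kv "OU" (by rw [h1]; decide),
        pvCount_snoc_other P kv "DC" (by rw [h1]; decide)]
    simp [h1]
  · by_cases h2 : kv.1 = "OU"
    · rw [pvCount_snoc_self P kv "OU" h2,
          pvCount_snoc_other P kv "DC" (by rw [h2]; decide)]
      have hcm : (1 : Int) + (P.countP (fun p => p.1 == "OU") : Int)
          = (P.countP (fun p => p.1 == "OU") : Int) + 1 := by ring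
      simp only [h2, hcm]
      split_ifs <;> simp_all
    · by_cases h3 : kv.1 = "DC"
      · rw [pvCount_snoc_self P kv "DC" h3,
            pvCount_snoc_other P kv "OU" (by rw [h3]; decide)]
        have hcm : (1 : Int) + (P.countP (fun p => p.1 == "DC") : Int)
            = (P.countP (fun p => p.1 == "DC") : Int) + 1 := by ring
        simp only [h3, hcm]
        split_ifs <;> simp_all
      · rw [pvCount_snoc_other P kv "OU" h2, pvCount_snoc_other P kv "DC" h3]
        simp [h1, h2, h3]

-- main invariant: A's counter loop equals dict() over the labeled list
theorem pvMain (P : List (String × String)) :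
    P.foldl pvStepP (PySem.Dict.empty, 0, 0)
      = ((pvSlotted P).foldl (fun d kv => d.insert kv.1 kv.2) PySem.Dict.empty,
         (P.countP (fun p => p.1 == "OU") : Int), (P.countP (fun p => p.1 == "DC") : Int)) := by
  induction P using List.reverseRecOn with
  | nil => rfl
  | append_singleton P kv ih =>
    rw [List.foldl_append, List.foldl_cons, List.foldl_nil, ih, pvStepP_snoc,
        pvSlotted_snoc, List.foldl_append]

-- A's 'if key not in d: d[key] = ""' is setdefault
theorem pvFill_eq (d : PySem.Dict String String) (keys : List String) :
    keys.foldl (fun d key => if d.contains key then d else d.insert key "") d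
      = keys.foldl (fun d key => d.setdefault key "") d := by
  induction keys generalizing d with
  | nil => rfl
  | cons k t ih =>
    simp only [List.foldl_cons]
    rw [← ih]
    congr 1
    by_cases hc : d.contains k
    · rw [if_pos hc, PySem.Dict.setdefault_of_contains _ _ hc]
    · rw [if_neg hc, PySem.Dict.setdefault_of_not_contains _ _ (by simpa using hc)]

-- ===== VERDICT (by name: the statement is the Claim_ definition above) =====
theorem parse_dn_spec : Claim_equal_parse_dn := by
  intro dn _
  unfold Spec_parse_dn
  simp only [parse_dn, parse_dn_alt]
  rw [pvA_fold, pvB_fold, List.nil_append, pvMain, pvFill_eq]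
  rfl
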